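-- pv_equiv track=rewrite | github.com/CDBiddulph/scaffold-learning | experiments/keep_crosswords_lenient_20250712_162447/scaffolds/10/scaffold.py | find_word_lengths
-- ===== SOURCE A (Python) =====
-- def find_word_lengths(grid_lines):
--     """Find the length of each word in the crossword"""
--     height = len(grid_lines)
--     width = len(grid_lines[0]) if height > 0 else 0
--
--     word_lengths = {}
--     current_num = 1
--
--     for row in range(height):
--         for col in range(width):
--             if grid_lines[row][col] == ".":
--                 continue
--
--             # Check if this position starts a word
--             starts_across = (
--                 (col == 0 or grid_lines[row][col - 1] == ".")
--                 and col + 1 < width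
--                 and grid_lines[row][col + 1] != "."
--             )
--             starts_down = (
--                 (row == 0 or grid_lines[row - 1][col] == ".")
--                 and row + 1 < height
--                 and grid_lines[row + 1][col] != "."
--             )
--
--             if starts_across or starts_down:
--                 if starts_across:
--                     length = 0
--                     c = col
--                     while c < width and grid_lines[row][c] != ".":
--                         length += 1
--                         c += 1
--                     word_lengths[('across', current_num)] = length
--
--                 if starts_down:
--                     length = 0
--                     r = row
--                     while r < height and grid_lines[r][col] != ".":
--                         length += 1
--                         r += 1
--                     word_lengths[('down', current_num)] = length
--
--                 current_num += 1
--
--     return word_lengths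
-- ===== SOURCE B (Python) =====
-- def find_word_lengths(grid_lines):
--     """Find the length of each word in the crossword"""
--     height = len(grid_lines)
--     width = len(grid_lines[0]) if height > 0 else 0
--
--     # Precompute run-length tables with one right-to-left / bottom-to-top sweep
--     # each: across[r][c] = length of the horizontal run of non-'.' cells
--     # starting at (r, c); down[c][r] likewise for vertical runs.
--     across = []
--     for r in range(height):
--         run = 0
--         row_runs = [0] * width
--         for c in range(width - 1, -1, -1):
--             run = 0 if grid_lines[r][c] == "." else run + 1
--             row_runs[c] = run
--         across.append(row_runs)
--
--     down = []
--     for c in range(width):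
--         run = 0
--         col_runs = [0] * height
--         for r in range(height - 1, -1, -1):
--             run = 0 if grid_lines[r][c] == "." else run + 1
--             col_runs[r] = run
--         down.append(col_runs)
--
--     word_lengths = {}
--     current_num = 1
--     for row in range(height):
--         for col in range(width):
--             if grid_lines[row][col] == ".":
--                 continue
--             starts_across = (col == 0 or grid_lines[row][col - 1] == ".") and across[row][col] >= 2
--             starts_down = (row == 0 or grid_lines[row - 1][col] == ".") and down[col][row] >= 2
--             if starts_across or starts_down:
--                 if starts_across:
--                     word_lengths[("across", current_num)] = across[row][col]
--                 if starts_down: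
--                     word_lengths[("down", current_num)] = down[col][row]
--                 current_num += 1
--     return word_lengths
-- ===== Notes on version B (the rewrite author's own statement) =====
-- stated objective: alternative
-- what changed: B replaces A's per-start-cell while-loop scans by two precomputed run-length tables (one right-to-left sweep per row for across, one bottom-to-top sweep per column for down), so the numbering pass just reads table entries and the start-of-word tests become 'run length >= 2'; it trades A's rescanning for two extra table-building sweeps.
import Mathlib
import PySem

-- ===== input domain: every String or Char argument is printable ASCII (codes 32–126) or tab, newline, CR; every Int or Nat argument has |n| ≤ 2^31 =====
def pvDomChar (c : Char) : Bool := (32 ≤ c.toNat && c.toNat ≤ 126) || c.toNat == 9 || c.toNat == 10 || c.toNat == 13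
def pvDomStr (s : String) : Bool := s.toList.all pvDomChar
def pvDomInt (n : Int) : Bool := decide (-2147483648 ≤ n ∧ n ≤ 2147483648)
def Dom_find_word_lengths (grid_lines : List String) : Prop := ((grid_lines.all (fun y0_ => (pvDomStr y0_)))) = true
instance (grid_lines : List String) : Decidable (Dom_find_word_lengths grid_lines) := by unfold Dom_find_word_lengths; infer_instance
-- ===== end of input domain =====

-- B replaces A's per-start-cell while-loop scans by two precomputed run-length
-- tables (one sweep per row / per column), read during a single numbering pass.

-- grid_lines[row][col]: both Pythons index the grid this way; the '.' default is
-- reached only outside Pre_ (where Python raises IndexError)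
def pvCell (g : List String) (r c : Nat) : Char := ((g[r]?.getD "").toList)[c]?.getD '.'

-- ===== PORT A =====
-- 'while c < width and grid_lines[row][c] != ".": length += 1; c += 1'
def pvWhileAcross (g : List String) (row width c len : Nat) : Nat :=
  if h : c < width ∧ pvCell g row c ≠ '.' then pvWhileAcross g row width (c+1) (len+1) else len
  termination_by width - c
  decreasing_by omega

-- 'while r < height and grid_lines[r][col] != ".": length += 1; r += 1'
def pvWhileDown (g : List String) (col height r len : Nat) : Nat :=
  if h : r < height ∧ pvCell g r col ≠ '.' then pvWhileDown g col height (r+1) (len+1) else len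
  termination_by height - r
  decreasing_by omega

-- one iteration of A's inner loop; state = (dict entries, current_num).
-- Dict keys ('across'/'down', current_num) are always fresh, so insert = append.
def pvStepA (g : List String) (height width : Nat)
    (st : List (String × Int × Int) × Int) (row col : Nat) : List (String × Int × Int) × Int :=
  if pvCell g row col = '.' then st else
  let sa := decide ((col = 0 ∨ pvCell g row (col-1) = '.') ∧ col + 1 < width ∧ pvCell g row (col+1) ≠ '.')
  let sd := decide ((row = 0 ∨ pvCell g (row-1) col = '.') ∧ row + 1 < height ∧ pvCell g (row+1) col ≠ '.')
  if sa || sd then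
    let st1 := if sa then (st.1 ++ [("across", st.2, (pvWhileAcross g row width col 0 : Int))], st.2) else st
    let st2 := if sd then (st1.1 ++ [("down", st1.2, (pvWhileDown g col height row 0 : Int))], st1.2) else st1
    (st2.1, st2.2 + 1)
  else st

def find_word_lengths (grid_lines : List String) : List (String × Int × Int) :=
  let height := grid_lines.length
  let width := if height > 0 then (grid_lines.headI).toList.length else 0
  ((List.range height).foldl (fun st row =>
      (List.range width).foldl (fun st col => pvStepA grid_lines height width st row col) st)
    ([], 1)).1

-- ===== PORT B =====
-- the cells grid_lines[r][0..width) resp. grid_lines[0..height)[c] that B's sweeps read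
def pvRowOf (g : List String) (r width : Nat) : List Char := (List.range width).map (fun c => pvCell g r c)
def pvColOf (g : List String) (c height : Nat) : List Char := (List.range height).map (fun r => pvCell g r c)

-- right-to-left sweep: run = 0 after '.', previous run + 1 otherwise
def pvRuns (cs : List Char) : List Nat :=
  match cs with
  | [] => []
  | ch :: rest =>
      let t := pvRuns rest
      (if ch = '.' then 0 else t.headD 0 + 1) :: t

-- table[i][j] (always in range for B's tables)
def pvAt (t : List (List Nat)) (i j : Nat) : Nat := (t[i]?.getD [])[j]?.getD 0

def pvStepB (g : List String) (acrossT downT : List (List Nat))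
    (st : List (String × Int × Int) × Int) (row col : Nat) : List (String × Int × Int) × Int :=
  if pvCell g row col = '.' then st else
  let sa := decide ((col = 0 ∨ pvCell g row (col-1) = '.') ∧ 2 ≤ pvAt acrossT row col)
  let sd := decide ((row = 0 ∨ pvCell g (row-1) col = '.') ∧ 2 ≤ pvAt downT col row)
  if sa || sd then
    let st1 := if sa then (st.1 ++ [("across", st.2, (pvAt acrossT row col : Int))], st.2) else st
    let st2 := if sd then (st1.1 ++ [("down", st1.2, (pvAt downT col row : Int))], st1.2) else st1
    (st2.1, st2.2 + 1)
  else st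

def find_word_lengths_alt (grid_lines : List String) : List (String × Int × Int) :=
  let height := grid_lines.length
  let width := if height > 0 then (grid_lines.headI).toList.length else 0
  let acrossT := (List.range height).map (fun r => pvRuns (pvRowOf grid_lines r width))
  let downT := (List.range width).map (fun c => pvRuns (pvColOf grid_lines c height))
  ((List.range height).foldl (fun st row =>
      (List.range width).foldl (fun st col => pvStepB grid_lines acrossT downT st row col) st)
    ([], 1)).1

-- ===== PRECONDITION & SPEC =====
-- Pre_ excludes ragged grids with a row shorter than the first row: there the
-- Python A raises IndexError (grid_lines[row][col] with col up to len(grid_lines[0])-1).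
def Pre_find_word_lengths (grid_lines : List String) : Prop :=
  ∀ s ∈ grid_lines, (grid_lines.headI).toList.length ≤ s.toList.length
instance (grid_lines : List String) : Decidable (Pre_find_word_lengths grid_lines) := by
  unfold Pre_find_word_lengths; infer_instance
def pvWitness_find_word_lengths : List String := ["AB.", "A.B", ".BB"]

def Spec_find_word_lengths (grid_lines : List String) (out : List (String × Int × Int)) : Prop := out = find_word_lengths_alt grid_lines
instance (grid_lines : List String) (out : List (String × Int × Int)) : Decidable (Spec_find_word_lengths grid_lines out) := by unfold Spec_find_word_lengths; infer_instance

-- ===== CLAIM (what is proved, stated in full; the proofs are below) =====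
def Claim_equal_find_word_lengths : Prop := ∀ (grid_lines : List String), Dom_find_word_lengths grid_lines → Pre_find_word_lengths grid_lines → Spec_find_word_lengths grid_lines (find_word_lengths grid_lines)

-- ===== LEMMAS AND PROOFS =====

-- the defining recurrence of the run-length table, via total lookup
theorem pvRuns_get (l : List Char) (c : Nat) :
    (pvRuns l)[c]?.getD 0 =
      if c < l.length ∧ l[c]?.getD '.' ≠ '.' then (pvRuns l)[c+1]?.getD 0 + 1 else 0 := by
  induction l generalizing c with
  | nil => simp [pvRuns]
  | cons ch rest ih =>
    cases c with
    | zero =>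
      by_cases h : ch = '.' <;>
        simp [pvRuns, h, List.headD_eq_head?_getD, List.head?_eq_getElem?]
    | succ c =>
      simpa [pvRuns] using ih c

theorem pvRuns_pos (l : List Char) (c : Nat) :
    1 ≤ (pvRuns l)[c]?.getD 0 ↔ (c < l.length ∧ l[c]?.getD '.' ≠ '.') := by
  rw [pvRuns_get]
  split_ifs with h
  · exact iff_of_true (by omega) h
  · simp [h]

theorem pvRowOf_get (g : List String) (r width c : Nat) :
    (pvRowOf g r width)[c]?.getD '.' = if c < width then pvCell g r c else '.' := by
  by_cases h : c < width <;> simp [pvRowOf, h]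

theorem pvColOf_get (g : List String) (c height r : Nat) :
    (pvColOf g c height)[r]?.getD '.' = if r < height then pvCell g r c else '.' := by
  by_cases h : r < height <;> simp [pvColOf, h]

theorem pvWhileAcross_eq (g : List String) (row width : Nat) :
    ∀ c len, pvWhileAcross g row width c len = len + (pvRuns (pvRowOf g row width))[c]?.getD 0 := by
  intro c len
  induction c, len using pvWhileAcross.induct g row width with
  | case1 c len h ih =>
    rw [pvWhileAcross, dif_pos h, ih]
    have hcond : c < (pvRowOf g row width).length ∧ (pvRowOf g row width)[c]?.getD '.' ≠ '.' := by
      refine ⟨by simpa [pvRowOf] using h.1, ?_⟩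
      rw [pvRowOf_get, if_pos h.1]; exact h.2
    conv_rhs => rw [pvRuns_get]
    rw [if_pos hcond]
    omega
  | case2 c len h =>
    rw [pvWhileAcross, dif_neg h, pvRuns_get, if_neg]
    · omega
    · intro hcon
      rcases hcon with ⟨h1, h2⟩
      simp only [pvRowOf, List.length_map, List.length_range] at h1
      rw [pvRowOf_get, if_pos h1] at h2
      exact h ⟨h1, h2⟩

theorem pvWhileDown_eq (g : List String) (col height : Nat) :
    ∀ r len, pvWhileDown g col height r len = len + (pvRuns (pvColOf g col height))[r]?.getD 0 := by
  intro r len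
  induction r, len using pvWhileDown.induct g col height with
  | case1 r len h ih =>
    rw [pvWhileDown, dif_pos h, ih]
    have hcond : r < (pvColOf g col height).length ∧ (pvColOf g col height)[r]?.getD '.' ≠ '.' := by
      refine ⟨by simpa [pvColOf] using h.1, ?_⟩
      rw [pvColOf_get, if_pos h.1]; exact h.2
    conv_rhs => rw [pvRuns_get]
    rw [if_pos hcond]
    omega
  | case2 r len h =>
    rw [pvWhileDown, dif_neg h, pvRuns_get, if_neg]
    · omega
    · intro hcon
      rcases hcon with ⟨h1, h2⟩
      simp only [pvColOf, List.length_map, List.length_range] at h1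
      rw [pvColOf_get, if_pos h1] at h2
      exact h ⟨h1, h2⟩

-- start predicates coincide: 'neighbour in range and non-"." ' ↔ 'run length ≥ 2'
theorem pvRun_two (l : List Char) (c : Nat) (hc : c < l.length) (hne : l[c]?.getD '.' ≠ '.') :
    (2 ≤ (pvRuns l)[c]?.getD 0) ↔ (c + 1 < l.length ∧ l[c+1]?.getD '.' ≠ '.') := by
  rw [pvRuns_get, if_pos ⟨hc, hne⟩]
  constructor
  · intro h; exact (pvRuns_pos l (c+1)).mp (by omega)
  · intro h; have := (pvRuns_pos l (c+1)).mpr h; omega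

theorem pvStep_eq (g : List String) (row col : Nat)
    (hr : row < g.length) (hc : col < (g.headI).toList.length) (st : List (String × Int × Int) × Int) :
    pvStepA g g.length ((g.headI).toList.length) st row col =
    pvStepB g ((List.range g.length).map (fun r => pvRuns (pvRowOf g r ((g.headI).toList.length))))
              ((List.range ((g.headI).toList.length)).map (fun c => pvRuns (pvColOf g c g.length))) st row col := by
  set W := (g.headI).toList.length with hW
  set H := g.length with hH
  have hA : pvAt ((List.range H).map (fun r => pvRuns (pvRowOf g r W))) row col
      = (pvRuns (pvRowOf g row W))[col]?.getD 0 := by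
    simp [pvAt, hr]
  have hD : pvAt ((List.range W).map (fun c => pvRuns (pvColOf g c H))) col row
      = (pvRuns (pvColOf g col H))[row]?.getD 0 := by
    simp [pvAt, hc]
  unfold pvStepA pvStepB
  by_cases hdot : pvCell g row col = '.'
  · simp [hdot]
  · have hrowlen : (pvRowOf g row W).length = W := by simp [pvRowOf]
    have hcollen : (pvColOf g col H).length = H := by simp [pvColOf]
    have hrc : (pvRowOf g row W)[col]?.getD '.' = pvCell g row col := by
      rw [pvRowOf_get, if_pos hc]
    have hcc : (pvColOf g col H)[row]?.getD '.' = pvCell g row col := by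
      rw [pvColOf_get, if_pos hr]
    have hsa : (col + 1 < W ∧ pvCell g row (col+1) ≠ '.') ↔ 2 ≤ pvAt ((List.range H).map (fun r => pvRuns (pvRowOf g r W))) row col := by
      rw [hA, pvRun_two (pvRowOf g row W) col (by rw [hrowlen]; exact hc) (by rw [hrc]; exact hdot)]
      · constructor
        · rintro ⟨h1, h2⟩
          refine ⟨by rw [hrowlen]; exact h1, ?_⟩
          rwa [pvRowOf_get, if_pos h1]
        · rintro ⟨h1, h2⟩
          rw [hrowlen] at h1
          rw [pvRowOf_get, if_pos h1] at h2
          exact ⟨h1, h2⟩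
    have hsd : (row + 1 < H ∧ pvCell g (row+1) col ≠ '.') ↔ 2 ≤ pvAt ((List.range W).map (fun c => pvRuns (pvColOf g c H))) col row := by
      rw [hD, pvRun_two (pvColOf g col H) row (by rw [hcollen]; exact hr) (by rw [hcc]; exact hdot)]
      · constructor
        · rintro ⟨h1, h2⟩
          refine ⟨by rw [hcollen]; exact h1, ?_⟩
          rwa [pvColOf_get, if_pos h1]
        · rintro ⟨h1, h2⟩
          rw [hcollen] at h1
          rw [pvColOf_get, if_pos h1] at h2
          exact ⟨h1, h2⟩
    have hlenA : (pvWhileAcross g row W col 0 : Int) = (pvAt ((List.range H).map (fun r => pvRuns (pvRowOf g r W))) row col : Int) := by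
      rw [pvWhileAcross_eq, hA]; simp
    have hlenD : (pvWhileDown g col H row 0 : Int) = (pvAt ((List.range W).map (fun c => pvRuns (pvColOf g c H))) col row : Int) := by
      rw [pvWhileDown_eq, hD]; simp
    simp only [if_neg hdot]
    rw [show decide ((col = 0 ∨ pvCell g row (col-1) = '.') ∧ col + 1 < W ∧ pvCell g row (col+1) ≠ '.')
        = decide ((col = 0 ∨ pvCell g row (col-1) = '.') ∧ 2 ≤ pvAt ((List.range H).map (fun r => pvRuns (pvRowOf g r W))) row col) from by
          simp only [decide_eq_decide]; exact and_congr_right fun _ => hsa,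
        show decide ((row = 0 ∨ pvCell g (row-1) col = '.') ∧ row + 1 < H ∧ pvCell g (row+1) col ≠ '.')
        = decide ((row = 0 ∨ pvCell g (row-1) col = '.') ∧ 2 ≤ pvAt ((List.range W).map (fun c => pvRuns (pvColOf g c H))) col row) from by
          simp only [decide_eq_decide]; exact and_congr_right fun _ => hsd,
        hlenA, hlenD]

theorem pvWidth_eq (g : List String) :
    (if g.length > 0 then (g.headI).toList.length else 0) = (g.headI).toList.length := by
  cases g <;> simp [List.headI]

-- ===== VERDICT (by name: the statement is the Claim_ definition above) =====
theorem find_word_lengths_spec : Claim_equal_find_word_lengths := by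
  intro g _ _
  unfold Spec_find_word_lengths find_word_lengths find_word_lengths_alt
  simp only [pvWidth_eq]
  congr 1
  apply PySem.List.foldl_congr_mem'
  intro row hrow st
  apply PySem.List.foldl_congr_mem'
  intro col hcol st'
  exact pvStep_eq g row col (List.mem_range.mp hrow) (List.mem_range.mp hcol) st'
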